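-- pv_equiv track=rewrite | github.com/Bablushakya/VantageTube-AI | backend/app/utils/validation.py | get_regeneration_hints
-- ===== SOURCE A (Python) =====
-- from typing import List, Dict, Tuple, Optional
--
-- def get_regeneration_hints(validation_details: Dict) -> List[str]:
--     """
--     Get hints for regeneration based on validation failures
--
--     Args:
--         validation_details: Validation details dict
--
--     Returns:
--         List of hints for improving content
--     """
--     hints = []
--
--     # Add error-based hints
--     for error in validation_details.get("errors", []):
--         if "too short" in error.lower():
--             hints.append("Expand content to meet minimum length requirements")
--         elif "too long" in error.lower():
--             hints.append("Reduce content to meet maximum length requirements")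
--         elif "duplicate" in error.lower():
--             hints.append("Remove duplicate tags")
--         elif "keyword density" in error.lower():
--             hints.append("Adjust keyword usage to meet 1-3% density target")
--
--     # Add warning-based hints
--     for warning in validation_details.get("warnings", []):
--         if "power word" in warning.lower():
--             hints.append("Include power words like 'How', 'Best', 'Ultimate'")
--         elif "keyword" in warning.lower():
--             hints.append("Incorporate target keywords more prominently")
--         elif "structure" in warning.lower():
--             hints.append("Add clear structure with paragraphs or sections")
--         elif "call-to-action" in warning.lower():
--             hints.append("Include a clear call-to-action")
--
--     return hints
-- ===== SOURCE B (Python) =====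
-- ERROR_RULES = [
--     ("too short", "Expand content to meet minimum length requirements"),
--     ("too long", "Reduce content to meet maximum length requirements"),
--     ("duplicate", "Remove duplicate tags"),
--     ("keyword density", "Adjust keyword usage to meet 1-3% density target"),
-- ]
--
-- WARNING_RULES = [
--     ("power word", "Include power words like 'How', 'Best', 'Ultimate'"),
--     ("keyword", "Incorporate target keywords more prominently"),
--     ("structure", "Add clear structure with paragraphs or sections"),
--     ("call-to-action", "Include a clear call-to-action"),
-- ]
--
--
-- def _apply_rule(slots, texts, sub, hint):
--     # one rule pass: fill every still-empty slot whose text contains sub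
--     return [hint if s is None and sub in t.lower() else s
--             for s, t in zip(slots, texts)]
--
--
-- def _classify(texts, rules):
--     # rule-major traversal: outer loop over rules, inner sweep over all messages;
--     # a slot, once filled by an earlier rule, is never overwritten, so the earliest
--     # rule wins and message order is preserved by the slot array itself
--     slots = [None] * len(texts)
--     for sub, hint in rules:
--         slots = _apply_rule(slots, texts, sub, hint)
--     return [h for h in slots if h is not None]
--
--
-- def get_regeneration_hints(validation_details):
--     return (_classify(validation_details.get("errors", []), ERROR_RULES)
--             + _classify(validation_details.get("warnings", []), WARNING_RULES))
-- ===== Notes on version B (the rewrite author's own statement) =====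
-- stated objective: alternative
-- what changed: B traverses rule-major instead of message-major: it keeps a slot array aligned with the messages and sweeps each rule in order over all still-empty slots, whereas A walks the messages once, deciding each with an if/elif chain; first-rule-wins and message order fall out of the slot array.
import Mathlib
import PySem

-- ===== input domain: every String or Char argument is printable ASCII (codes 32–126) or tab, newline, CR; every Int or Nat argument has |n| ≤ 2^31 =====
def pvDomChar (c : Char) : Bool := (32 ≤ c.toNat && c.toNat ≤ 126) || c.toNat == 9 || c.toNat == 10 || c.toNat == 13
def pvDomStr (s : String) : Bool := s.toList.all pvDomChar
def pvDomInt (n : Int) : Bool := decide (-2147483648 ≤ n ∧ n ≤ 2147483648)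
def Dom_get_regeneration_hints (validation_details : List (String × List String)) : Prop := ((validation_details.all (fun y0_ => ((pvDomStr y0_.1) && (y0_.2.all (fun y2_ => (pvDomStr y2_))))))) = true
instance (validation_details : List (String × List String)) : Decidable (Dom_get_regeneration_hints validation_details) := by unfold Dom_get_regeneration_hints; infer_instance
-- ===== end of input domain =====

-- B traverses rule-major with a slot array (outer loop over rules, inner sweep over
-- messages) instead of A's message-major if/elif chain (objective: alternative).


-- ===== PORT A =====
def get_regeneration_hints (validation_details : List (String × List String)) : List String :=
  let hints : List String := []
  -- for error in validation_details.get("errors", []):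
  let hints := (PySem.Dict.getD ⟨validation_details⟩ "errors" []).foldl (fun hints error =>
    if PySem.Str.isIn "too short" (PySem.Str.lower error) then
      hints ++ ["Expand content to meet minimum length requirements"]
    else if PySem.Str.isIn "too long" (PySem.Str.lower error) then
      hints ++ ["Reduce content to meet maximum length requirements"]
    else if PySem.Str.isIn "duplicate" (PySem.Str.lower error) then
      hints ++ ["Remove duplicate tags"]
    else if PySem.Str.isIn "keyword density" (PySem.Str.lower error) then
      hints ++ ["Adjust keyword usage to meet 1-3% density target"]
    else hints) hints
  -- for warning in validation_details.get("warnings", []):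
  let hints := (PySem.Dict.getD ⟨validation_details⟩ "warnings" []).foldl (fun hints warning =>
    if PySem.Str.isIn "power word" (PySem.Str.lower warning) then
      hints ++ ["Include power words like 'How', 'Best', 'Ultimate'"]
    else if PySem.Str.isIn "keyword" (PySem.Str.lower warning) then
      hints ++ ["Incorporate target keywords more prominently"]
    else if PySem.Str.isIn "structure" (PySem.Str.lower warning) then
      hints ++ ["Add clear structure with paragraphs or sections"]
    else if PySem.Str.isIn "call-to-action" (PySem.Str.lower warning) then
      hints ++ ["Include a clear call-to-action"]
    else hints) hints
  hints

-- ===== PORT B =====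
def ERROR_RULES : List (String × String) :=
  [("too short", "Expand content to meet minimum length requirements"),
   ("too long", "Reduce content to meet maximum length requirements"),
   ("duplicate", "Remove duplicate tags"),
   ("keyword density", "Adjust keyword usage to meet 1-3% density target")]

def WARNING_RULES : List (String × String) :=
  [("power word", "Include power words like 'How', 'Best', 'Ultimate'"),
   ("keyword", "Incorporate target keywords more prominently"),
   ("structure", "Add clear structure with paragraphs or sections"),
   ("call-to-action", "Include a clear call-to-action")]

-- one rule pass: fill every still-empty slot whose text contains sub
def apply_rule (slots : List (Option String)) (texts : List String) (sub hint : String) : List (Option String) :=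
  (slots.zip texts).map (fun st =>
    if st.1.isNone && PySem.Str.isIn sub (PySem.Str.lower st.2) then some hint else st.1)

-- rule-major traversal: outer loop over rules, inner sweep over all messages
def classify (texts : List String) (rules : List (String × String)) : List String :=
  (rules.foldl (fun slots r => apply_rule slots texts r.1 r.2)
    (List.replicate texts.length none)).filterMap id

def get_regeneration_hints_alt (validation_details : List (String × List String)) : List String :=
  classify (PySem.Dict.getD ⟨validation_details⟩ "errors" []) ERROR_RULES
    ++ classify (PySem.Dict.getD ⟨validation_details⟩ "warnings" []) WARNING_RULES

-- ===== PRECONDITION & SPEC =====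
def Spec_get_regeneration_hints (validation_details : List (String × List String)) (out : List String) : Prop := out = get_regeneration_hints_alt validation_details
instance (validation_details : List (String × List String)) (out : List String) : Decidable (Spec_get_regeneration_hints validation_details out) := by unfold Spec_get_regeneration_hints; infer_instance

-- ===== CLAIM (what is proved, stated in full; the proofs are below) =====
def Claim_equal_get_regeneration_hints : Prop := ∀ (validation_details : List (String × List String)), Dom_get_regeneration_hints validation_details → Spec_get_regeneration_hints validation_details (get_regeneration_hints validation_details)

-- ===== LEMMAS AND PROOFS =====

-- proof-side characterisation: the first rule whose substring occurs in text.lower()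
def firstHint (rules : List (String × String)) (text : String) : Option String :=
  (rules.find? (fun r => PySem.Str.isIn r.1 (PySem.Str.lower text))).map (·.2)

lemma firstHint_append (rs : List (String × String)) (r : String × String) (t : String) :
    firstHint (rs ++ [r]) t
      = (if (firstHint rs t).isNone && PySem.Str.isIn r.1 (PySem.Str.lower t)
          then some r.2 else firstHint rs t) := by
  simp only [firstHint, List.find?_append]
  cases h : rs.find? (fun x => PySem.Str.isIn x.1 (PySem.Str.lower t)) with
  | none => simp [List.find?]; split_ifs <;> simp_all
  | some v => simp

-- one rule pass updates the pointwise firstHint of the processed prefix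
lemma apply_rule_map (texts : List String) (done : List (String × String)) (r : String × String) :
    apply_rule (texts.map (firstHint done)) texts r.1 r.2
      = texts.map (firstHint (done ++ [r])) := by
  induction texts with
  | nil => rfl
  | cons t ts ih =>
    simp only [apply_rule, List.map_cons, List.zip_cons_cons] at ih ⊢
    rw [ih, firstHint_append]

-- the rule-major fold computes the pointwise firstHint over all rules
lemma foldl_apply_rule (texts : List String) :
    ∀ (rules done : List (String × String)),
      rules.foldl (fun slots r => apply_rule slots texts r.1 r.2) (texts.map (firstHint done))
        = texts.map (firstHint (done ++ rules)) := by
  intro rules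
  induction rules with
  | nil => simp
  | cons r rs ih =>
    intro done
    rw [List.foldl_cons, apply_rule_map, ih]
    simp

lemma classify_eq (texts : List String) (rules : List (String × String)) :
    classify texts rules = texts.filterMap (firstHint rules) := by
  unfold classify
  have h0 : List.replicate texts.length (none : Option String)
      = texts.map (firstHint []) := by
    have : firstHint ([] : List (String × String)) = fun _ => (none : Option String) := rfl
    rw [this]
    simp
  rw [h0, foldl_apply_rule texts rules [], List.nil_append, List.filterMap_map]
  simp [Function.comp]

-- A's error if/elif chain on one item is the first-match over ERROR_RULES
lemma errStep (hints : List String) (e : String) :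
    (if PySem.Str.isIn "too short" (PySem.Str.lower e) then
      hints ++ ["Expand content to meet minimum length requirements"]
    else if PySem.Str.isIn "too long" (PySem.Str.lower e) then
      hints ++ ["Reduce content to meet maximum length requirements"]
    else if PySem.Str.isIn "duplicate" (PySem.Str.lower e) then
      hints ++ ["Remove duplicate tags"]
    else if PySem.Str.isIn "keyword density" (PySem.Str.lower e) then
      hints ++ ["Adjust keyword usage to meet 1-3% density target"]
    else hints)
    = hints ++ (firstHint ERROR_RULES e).toList := by
  simp only [firstHint, ERROR_RULES, List.find?]
  split_ifs <;> simp_all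

lemma warnStep (hints : List String) (w : String) :
    (if PySem.Str.isIn "power word" (PySem.Str.lower w) then
      hints ++ ["Include power words like 'How', 'Best', 'Ultimate'"]
    else if PySem.Str.isIn "keyword" (PySem.Str.lower w) then
      hints ++ ["Incorporate target keywords more prominently"]
    else if PySem.Str.isIn "structure" (PySem.Str.lower w) then
      hints ++ ["Add clear structure with paragraphs or sections"]
    else if PySem.Str.isIn "call-to-action" (PySem.Str.lower w) then
      hints ++ ["Include a clear call-to-action"]
    else hints)
    = hints ++ (firstHint WARNING_RULES w).toList := by
  simp only [firstHint, WARNING_RULES, List.find?]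
  split_ifs <;> simp_all

-- a fold that appends the item's first-match hint IS filterMap
lemma foldl_append_firstHint (rules : List (String × String)) :
    ∀ (xs : List String) (hints : List String),
      xs.foldl (fun h x => h ++ (firstHint rules x).toList) hints
        = hints ++ xs.filterMap (firstHint rules) := by
  intro xs
  induction xs with
  | nil => simp
  | cons x xs ih =>
    intro hints
    simp only [List.foldl_cons, List.filterMap_cons, ih]
    cases firstHint rules x <;> simp

-- ===== VERDICT (by name: the statement is the Claim_ definition above) =====
theorem get_regeneration_hints_spec : Claim_equal_get_regeneration_hints := by
  intro d _
  show get_regeneration_hints d = get_regeneration_hints_alt d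
  unfold get_regeneration_hints get_regeneration_hints_alt
  simp only [errStep, warnStep, foldl_append_firstHint, classify_eq, List.nil_append]
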